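-- pv_equiv track=rewrite | github.com/surenkumard/Leetcode---problems-with-me | Check whether K-th bit is set or not - GFG/check-whether-kth-bit-is-set-or-not.py | checkKthBit
-- ===== SOURCE A (Python) =====
-- def checkKthBit(n,k):
--     #Your code here
--     arr = []
--     while(n > 0):
--         arr.append(n%2)
--         n = n // 2
--
--
--     if len(arr) <= k:
--         return 0
--
--
--     if arr[k] == 1:
--         return 1
--
--     return 0
-- ===== SOURCE B (Python) =====
-- def checkKthBit(n, k):
--     # Closed-form bit test: no list of bits is built, no loop runs.
--     return (n >> k) % 2 if n > 0 else 0
-- ===== Notes on version B (the rewrite author's own statement) =====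
-- stated objective: simpler
-- what changed: Replaces the loop that builds the whole list of binary digits with a direct O(1) arithmetic bit test (n >> k) % 2, guarded by n > 0.
-- outside the precondition, e.g. on checkKthBit(5, -1): A returns 1, B raises ValueError
import Mathlib
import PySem

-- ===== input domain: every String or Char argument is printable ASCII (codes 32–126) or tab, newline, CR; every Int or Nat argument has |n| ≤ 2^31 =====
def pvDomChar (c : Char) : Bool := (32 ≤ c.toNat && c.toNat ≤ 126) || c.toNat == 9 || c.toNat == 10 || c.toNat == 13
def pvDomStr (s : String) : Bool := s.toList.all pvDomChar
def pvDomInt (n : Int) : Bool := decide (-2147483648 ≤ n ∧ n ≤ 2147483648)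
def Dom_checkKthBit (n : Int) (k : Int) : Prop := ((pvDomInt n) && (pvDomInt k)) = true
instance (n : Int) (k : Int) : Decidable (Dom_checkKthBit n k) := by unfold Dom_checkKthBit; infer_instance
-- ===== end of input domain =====

-- B replaces A's bit-list-building loop with the direct arithmetic bit test (n >> k) % 2 (simpler, O(1)).


-- ===== PORT A =====
-- the while loop 'while n > 0: arr.append(n%2); n = n//2' (arr built front-to-back = cons order here)
def pvBitsA (n : Int) : List Int :=
  if _h : 0 < n then PySem.Int.mod n 2 :: pvBitsA (PySem.Int.floordiv n 2) else []
termination_by n.toNat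
decreasing_by rw [PySem.Int.floordiv_eq_ediv_of_pos (by omega)]; omega

def checkKthBit (n : Int) (k : Int) : Int :=
  let arr := pvBitsA n
  if (arr.length : Int) ≤ k then 0
  else if (PySem.List.pyGet? arr k).getD 0 = 1 then 1 else 0
  -- getD 0 is never taken under Pre_ (0 ≤ k < len there); pyGet? = arr[k] with Python indexing

-- ===== PORT B =====
-- (n >> k) % 2 if n > 0 else 0 ; '>>' with k ≥ 0 (guaranteed by Pre_) is '>>> k.toNat'
def checkKthBit_alt (n : Int) (k : Int) : Int :=
  if 0 < n then PySem.Int.mod (n >>> k.toNat) 2 else 0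

-- ===== PRECONDITION & SPEC =====
-- Pre_ excludes k < 0: there A either raises IndexError (n ≤ 0) or returns a value by accidental
-- negative-index wraparound into its bit list (n > 0), where B's shift raises ValueError.
def Pre_checkKthBit (n : Int) (k : Int) : Prop := 0 ≤ k
instance (n : Int) (k : Int) : Decidable (Pre_checkKthBit n k) := by unfold Pre_checkKthBit; infer_instance
def pvWitness_checkKthBit : Int × Int := (5, 2)

def Spec_checkKthBit (n : Int) (k : Int) (out : Int) : Prop := out = checkKthBit_alt n k
instance (n : Int) (k : Int) (out : Int) : Decidable (Spec_checkKthBit n k out) := by unfold Spec_checkKthBit; infer_instance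

-- ===== CLAIM (what is proved, stated in full; the proofs are below) =====
def Claim_equal_checkKthBit : Prop := ∀ (n : Int) (k : Int), Dom_checkKthBit n k → Pre_checkKthBit n k → Spec_checkKthBit n k (checkKthBit n k)

-- ===== LEMMAS AND PROOFS =====

-- the "k-th entry, defaulting to 0 past the end" of A's bit list is exactly (n / 2^j) % 2
theorem pvBitsA_val : ∀ (m : Nat) (n : Int), 0 < n → n.toNat ≤ m → ∀ j : Nat,
    (if ((pvBitsA n).length : Int) ≤ (j : Int) then (0:Int)
     else (PySem.List.pyGet? (pvBitsA n) (j : Int)).getD 0) = (n / 2^j) % 2 := by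
  intro m
  induction m with
  | zero => intro n hn hm; omega
  | succ m ih =>
    intro n hn hm j
    rw [pvBitsA, dif_pos hn, PySem.Int.mod_eq_emod_of_pos (by norm_num),
        PySem.Int.floordiv_eq_ediv_of_pos (by norm_num)]
    cases j with
    | zero =>
      simp
    | succ j =>
      have hcast : ((j + 1 : Nat) : Int) = (j : Int) + 1 := by push_cast; ring
      rw [hcast, PySem.List.pyGet?_cons_succ]
      have hdd : n / 2 / 2^j = n / 2^(j+1) := by
        rw [Int.ediv_ediv_of_nonneg (by norm_num)]; ring_nf
      by_cases h2 : 0 < n / 2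
      · have := ih (n / 2) h2 (by omega) j
        rw [← hdd]
        rw [← this]
        have hlen : (((n % 2 :: pvBitsA (n / 2)).length : Int) ≤ (j:Int) + 1)
            ↔ (((pvBitsA (n / 2)).length : Int) ≤ (j:Int)) := by
          simp only [List.length_cons]; push_cast; omega
        split_ifs with hA hB hB
        · rfl
        · exact absurd (hlen.mp hA) hB
        · exact absurd (hlen.mpr hB) hA
        · rfl
      · -- n = 1 : tail is empty, and n / 2^(j+1) = 0
        have hn1 : n = 1 := by omega
        subst hn1
        have : (1:Int) / 2^(j+1) = 0 := by
          apply Int.ediv_eq_zero_of_lt (by norm_num)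
          calc (1:Int) < 2^1 := by norm_num
            _ ≤ 2^(j+1) := by apply pow_le_pow_right₀ <;> omega
        rw [this]
        rw [pvBitsA, dif_neg h2]
        simp

-- ===== VERDICT (by name: the statement is the Claim_ definition above) =====
theorem checkKthBit_spec : Claim_equal_checkKthBit := by
  unfold Claim_equal_checkKthBit Spec_checkKthBit Pre_checkKthBit
  intro n k _ hk
  unfold checkKthBit checkKthBit_alt
  by_cases hn : 0 < n
  · rw [if_pos hn]
    have hkj : k = (k.toNat : Int) := by omega
    have hv := pvBitsA_val n.toNat n hn (le_refl _) k.toNat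
    rw [← hkj] at hv
    rw [PySem.Int.mod_eq_emod_of_pos (by norm_num), Int.shiftRight_eq_div_pow]
    push_cast
    rw [← hv]
    have h01 : (n / 2 ^ k.toNat) % 2 = 0 ∨ (n / 2 ^ k.toNat) % 2 = 1 := Int.emod_two_eq_zero_or_one _
    rw [← hv] at h01
    split_ifs with hA hB
    · rfl
    · exact hB.symm
    · rw [if_neg hA] at h01; omega
  · rw [if_neg hn]
    have : pvBitsA n = [] := by rw [pvBitsA, dif_neg hn]
    simp [this]
    omega
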